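-- pv_equiv track=rewrite | github.com/Demtsov/Reverse_engineering | main.py | safe_function
-- ===== SOURCE A (Python) =====
-- def safe_function(input_data):
--     buffer_size = 10
--     buffer = [""] * buffer_size
--     data = input_data[:buffer_size]
--     for i in range(len(data)):
--         if i < buffer_size:
--             buffer[i] = data[i]
--     return buffer
-- ===== SOURCE B (Python) =====
-- def safe_function(input_data):
--     data = input_data[:10]
--     return list(data) + [""] * (10 - len(data))
-- ===== Notes on version B (the rewrite author's own statement) =====
-- stated objective: simpler
-- what changed: Replaces the preallocated buffer with an index-assignment loop by a single slice concatenated with an arithmetically computed run of empty-string padding, with no loop or index writes.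
import Mathlib
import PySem

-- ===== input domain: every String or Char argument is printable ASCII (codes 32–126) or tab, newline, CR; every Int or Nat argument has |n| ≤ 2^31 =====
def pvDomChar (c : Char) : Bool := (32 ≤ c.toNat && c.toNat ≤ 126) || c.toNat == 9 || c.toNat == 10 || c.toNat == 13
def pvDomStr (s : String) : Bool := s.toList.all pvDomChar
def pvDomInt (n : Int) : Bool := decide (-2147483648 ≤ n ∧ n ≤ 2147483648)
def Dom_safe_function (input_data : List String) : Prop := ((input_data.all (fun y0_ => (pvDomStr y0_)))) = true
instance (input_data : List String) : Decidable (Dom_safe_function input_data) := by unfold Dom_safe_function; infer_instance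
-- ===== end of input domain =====

-- B replaces A's preallocated buffer and index-assignment loop by a slice plus arithmetic padding (simpler; same cost).

-- ===== PORT A =====
def safe_function (input_data : List String) : List String :=
  let buffer_size : Int := 10
  let buffer : List String := List.replicate 10 ""
  let data := PySem.List.slice input_data none (some buffer_size)
  (PySem.List.pyRange 0 (data.length : Int) 1).foldl
    (fun buf i =>
      if i < buffer_size then PySem.List.pySetD buf i (PySem.List.pyGetD data i "") else buf)
    buffer

-- ===== PORT B =====
def safe_function_alt (input_data : List String) : List String :=
  let data := input_data.take 10
  data ++ List.replicate (10 - data.length) ""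

-- ===== PRECONDITION & SPEC =====
def Spec_safe_function (input_data : List String) (out : List String) : Prop := out = safe_function_alt input_data
instance (input_data : List String) (out : List String) : Decidable (Spec_safe_function input_data out) := by unfold Spec_safe_function; infer_instance

-- ===== CLAIM (what is proved, stated in full; the proofs are below) =====
def Claim_equal_safe_function : Prop := ∀ (input_data : List String), Dom_safe_function input_data → Spec_safe_function input_data (safe_function input_data)

-- ===== LEMMAS AND PROOFS =====
-- Invariant of A's loop: after the first j writes the buffer is data.take j followed by blanks;
-- running the remaining iterations yields data followed by 10 - data.length blanks.
lemma safe_function_loop_inv (data : List String) (hn : data.length ≤ 10) :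
    ∀ (m j : Nat), j + m = data.length →
    (PySem.List.pyRange (j : Int) (data.length : Int) 1).foldl
      (fun buf i =>
        if i < (10:Int) then PySem.List.pySetD buf i (PySem.List.pyGetD data i "") else buf)
      (data.take j ++ List.replicate (10 - j) "")
    = data ++ List.replicate (10 - data.length) "" := by
  intro m
  induction m with
  | zero =>
      intro j hj
      rw [PySem.List.pyRange_one_eq_nil (by omega)]
      simp only [List.foldl_nil]
      rw [show j = data.length by omega, List.take_length]
  | succ m ih =>
      intro j hj
      have hjlt : j < data.length := by omega
      rw [PySem.List.pyRange_one_cons (by exact_mod_cast hjlt)]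
      simp only [List.foldl_cons]
      rw [if_pos (by exact_mod_cast (by omega : j < 10))]
      rw [PySem.List.pySetD_natCast, PySem.List.pyGetD_natCast]
      have hset : (data.take j ++ List.replicate (10 - j) "").set j (data.getD j "")
          = data.take (j+1) ++ List.replicate (10 - (j+1)) "" := by
        have h1 : 10 - j = (10 - (j+1)) + 1 := by omega
        rw [h1, List.replicate_succ, List.set_append_right _ _ (by simp [hjlt.le])]
        have hlen : (data.take j).length = j := List.length_take_of_le hjlt.le
        rw [hlen, Nat.sub_self]
        rw [List.set_cons_zero, List.getD_eq_getElem _ _ hjlt,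
            List.take_succ_eq_append_getElem hjlt, List.append_assoc, List.singleton_append]
      rw [hset, show ((j:Int) + 1) = ((j+1 : Nat) : Int) by push_cast; ring]
      exact ih (j+1) (by omega)

-- ===== VERDICT (by name: the statement is the Claim_ definition above) =====
theorem safe_function_spec : Claim_equal_safe_function := by
  intro xs _
  unfold Spec_safe_function safe_function safe_function_alt
  simp only []
  rw [show PySem.List.slice xs none (some (10:Int)) = xs.take 10 from
      PySem.List.slice_to_natCast xs 10]
  have h10 : (xs.take 10).length ≤ 10 := by simp
  have := safe_function_loop_inv (xs.take 10) h10 ((xs.take 10).length) 0 (by omega)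
  simpa using this
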